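-- pv_equiv track=rewrite | github.com/leesunyong/BaekJoon | 5430/solution.py | solution
-- ===== SOURCE A (Python) =====
-- def solution(p, array):
--     length = len(array)
--     reversed = False
--     for f in p:
--         if f == 'R':
--             reversed = not reversed
--         else :
--             if length == 0: return 'error'
--             length -= 1
--             if reversed: del array[-1]
--             else : del array[0]
--
--     if reversed:
--         array.reverse()
--
--     return '[' + ','.join(array) + ']'
-- ===== SOURCE B (Python) =====
-- def solution(p, array):
--     # Count deletions instead of performing them: one pass over p tallies how
--     # many elements fall off the (original) front and back; the error test and
--     # the surviving window are then pure arithmetic, done once at the end.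
--     # Note: A mutates `array` in place; B does not (return-value equivalence).
--     front = back = 0
--     rev = False
--     for f in p:
--         if f == 'R':
--             rev = not rev
--         elif rev:
--             back += 1
--         else:
--             front += 1
--     if front + back > len(array):
--         return 'error'
--     mid = array[front:len(array) - back]
--     if rev:
--         mid.reverse()
--     return '[' + ','.join(mid) + ']'
-- ===== Notes on version B (the rewrite author's own statement) =====
-- stated objective: faster
-- what changed: A executes every delete on the list (front deletion is O(n) each) and checks for emptiness as it goes; B never touches the list in the loop: it only tallies front/back deletion counts and the final parity, decides 'error' by a single arithmetic comparison afterwards, and takes one slice at the end.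
import Mathlib
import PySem

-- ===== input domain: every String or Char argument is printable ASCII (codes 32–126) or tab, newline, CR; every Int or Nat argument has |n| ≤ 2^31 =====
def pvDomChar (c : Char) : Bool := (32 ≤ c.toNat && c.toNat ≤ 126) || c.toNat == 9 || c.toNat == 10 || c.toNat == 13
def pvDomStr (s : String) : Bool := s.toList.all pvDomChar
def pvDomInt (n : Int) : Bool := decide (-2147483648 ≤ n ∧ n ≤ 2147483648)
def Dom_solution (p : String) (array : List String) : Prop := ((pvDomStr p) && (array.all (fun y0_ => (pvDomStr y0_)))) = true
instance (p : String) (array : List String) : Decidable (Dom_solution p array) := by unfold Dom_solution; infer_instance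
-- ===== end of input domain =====

-- B counts front/back deletions in one pass and slices once, instead of A's per-command list deletion; return-value equivalence only (A mutates `array` in place, B does not).

-- ===== PORT A =====
-- A's loop over p: state (length, array, reversed); `none` = the early `return 'error'`.
def solLoopA : List Char → Nat → List String → Bool → Option (Nat × List String × Bool)
  | [], length, arr, rev => some (length, arr, rev)
  | f :: fs, length, arr, rev =>
    if f = 'R' then solLoopA fs length arr (!rev)
    else
      if length = 0 then none
      else
        if rev then solLoopA fs (length - 1) arr.dropLast rev   -- del array[-1]
        else solLoopA fs (length - 1) arr.tail rev              -- del array[0]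

def solution (p : String) (array : List String) : String :=
  match solLoopA p.toList array.length array false with
  | none => "error"
  | some (_, arr, rev) =>
    let arr := if rev then arr.reverse else arr
    "[" ++ PySem.Str.join "," arr ++ "]"

-- ===== PORT B =====
-- B's counting pass: fold over p with state (front, back, rev); no list access, no error branch.
def solStepB (s : Nat × Nat × Bool) (f : Char) : Nat × Nat × Bool :=
  if f = 'R' then (s.1, s.2.1, !s.2.2)
  else if s.2.2 then (s.1, s.2.1 + 1, s.2.2)
  else (s.1 + 1, s.2.1, s.2.2)

def solution_alt (p : String) (array : List String) : String :=
  let st := p.toList.foldl solStepB (0, 0, false)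
  let front := st.1
  let back := st.2.1
  let rev := st.2.2
  if array.length < front + back then "error"
  else
    -- array[front : len - back] with front + back ≤ len: drop front, take (len - back - front)
    let mid := (array.drop front).take (array.length - back - front)
    let mid := if rev then mid.reverse else mid
    "[" ++ PySem.Str.join "," mid ++ "]"

-- ===== PRECONDITION & SPEC =====
def Spec_solution (p : String) (array : List String) (out : String) : Prop := out = solution_alt p array
instance (p : String) (array : List String) (out : String) : Decidable (Spec_solution p array out) := by unfold Spec_solution; infer_instance

-- ===== CLAIM (what is proved, stated in full; the proofs are below) =====
def Claim_equal_solution : Prop := ∀ (p : String) (array : List String), Dom_solution p array → Spec_solution p array (solution p array)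

-- ===== LEMMAS AND PROOFS =====

-- proof-side closed forms for the two passes: front deletions, back deletions, final parity
def fdC : List Char → Bool → Nat
  | [], _ => 0
  | f :: fs, rev => if f = 'R' then fdC fs (!rev) else if rev then fdC fs rev else fdC fs rev + 1

def bdC : List Char → Bool → Nat
  | [], _ => 0
  | f :: fs, rev => if f = 'R' then bdC fs (!rev) else if rev then bdC fs rev + 1 else bdC fs rev

def rvC : List Char → Bool → Bool
  | [], rev => rev
  | f :: fs, rev => if f = 'R' then rvC fs (!rev) else rvC fs rev

theorem foldB_eq (fs : List Char) : ∀ (f0 b0 : Nat) (rev : Bool),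
    fs.foldl solStepB (f0, b0, rev) = (f0 + fdC fs rev, b0 + bdC fs rev, rvC fs rev) := by
  induction fs with
  | nil => intro f0 b0 rev; simp [fdC, bdC, rvC]
  | cons f fs ih =>
    intro f0 b0 rev
    by_cases hR : f = 'R'
    · simp [solStepB, hR, fdC, bdC, rvC, ih]
    · cases rev <;> simp [solStepB, hR, fdC, bdC, rvC, ih] <;> omega

theorem loopA_eq (fs : List Char) : ∀ (arr : List String) (rev : Bool),
    solLoopA fs arr.length arr rev =
      if arr.length < fdC fs rev + bdC fs rev then none
      else some (arr.length - (fdC fs rev + bdC fs rev),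
                 (arr.drop (fdC fs rev)).take (arr.length - bdC fs rev - fdC fs rev),
                 rvC fs rev) := by
  induction fs with
  | nil => intro arr rev; simp [solLoopA, fdC, bdC, rvC]
  | cons f fs ih =>
    intro arr rev
    by_cases hR : f = 'R'
    · simp [solLoopA, hR, fdC, bdC, rvC, ih]
    · cases rev with
      | false =>
        cases arr with
        | nil => simp [solLoopA, hR, fdC, bdC]
        | cons a as =>
          simp only [solLoopA, fdC, bdC, rvC, if_neg hR, List.length_cons, List.tail_cons,
            Nat.add_sub_cancel, Bool.false_eq_true, if_false]
          rw [if_neg (by omega : ¬(as.length + 1 = 0)), ih as false]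
          by_cases hlt : as.length < fdC fs false + bdC fs false
          · rw [if_pos hlt, if_pos (by omega)]
          · rw [if_neg hlt, if_neg (by omega)]
            have e1 : as.length + 1 - (fdC fs false + 1 + bdC fs false)
                = as.length - (fdC fs false + bdC fs false) := by omega
            have e2 : as.length + 1 - bdC fs false - (fdC fs false + 1)
                = as.length - bdC fs false - fdC fs false := by omega
            simp [e1, e2, List.drop_succ_cons]
      | true =>
        cases arr with
        | nil => simp [solLoopA, hR, fdC, bdC]
        | cons a as =>
          have hIH := ih ((a :: as).dropLast) true
          rw [show ((a :: as).dropLast).length = as.length by simp] at hIH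
          simp only [solLoopA, fdC, bdC, rvC, if_neg hR, if_true,
            List.length_cons, Nat.add_sub_cancel]
          rw [if_neg (by omega : ¬(as.length + 1 = 0)), hIH]
          by_cases hlt : as.length < fdC fs true + bdC fs true
          · rw [if_pos hlt, if_pos (by omega)]
          · rw [if_neg hlt, if_neg (by omega)]
            have e1 : as.length + 1 - (fdC fs true + (bdC fs true + 1))
                = as.length - (fdC fs true + bdC fs true) := by omega
            have e2 : as.length + 1 - (bdC fs true + 1) - fdC fs true
                = as.length - bdC fs true - fdC fs true := by omega
            have hdl : (((a :: as).dropLast).drop (fdC fs true)).take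
                  (as.length - bdC fs true - fdC fs true)
                = ((a :: as).drop (fdC fs true)).take
                  (as.length - bdC fs true - fdC fs true) := by
              rw [List.dropLast_eq_take, List.length_cons, Nat.add_sub_cancel,
                List.drop_take, List.take_take]
              congr 1
              omega
            rw [hdl] at *
            simp [e1]

-- ===== VERDICT (by name: the statement is the Claim_ definition above) =====
theorem solution_spec : Claim_equal_solution := by
  intro p array _
  unfold Spec_solution solution solution_alt
  rw [loopA_eq, foldB_eq]
  simp only [Nat.zero_add]
  by_cases h : array.length < fdC p.toList false + bdC p.toList false
  · simp only [if_pos h]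
  · simp only [if_neg h]
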